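-- pv_equiv track=rewrite | github.com/Akshat-jwr/Agri-Bot | agri-intelligence-backend/app/tools/vector_tools/semantic_search.py | _build_topic_filters
-- ===== SOURCE A (Python) =====
-- from typing import Dict, List, Optional
--
-- def _build_topic_filters(topic: str) -> Dict:
--     """Build filters based on agricultural topic"""
--     topic_lower = topic.lower()
--     filters = {}
--
--     # Topic-based filtering
--     if any(word in topic_lower for word in ['fertilizer', 'nutrient', 'soil']):
--         filters['topics'] = 'fertilizer'
--     elif any(word in topic_lower for word in ['irrigation', 'water']):
--         filters['topics'] = 'irrigation'
--     elif any(word in topic_lower for word in ['pest', 'disease', 'insect']):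
--         filters['topics'] = 'pest_control'
--     elif any(word in topic_lower for word in ['weather', 'climate', 'rain']):
--         filters['topics'] = 'climate'
--     elif any(word in topic_lower for word in ['price', 'market', 'sell']):
--         filters['topics'] = 'market'
--     elif any(word in topic_lower for word in ['scheme', 'subsidy', 'government']):
--         filters['topics'] = 'policy'
--
--     return filters
-- ===== SOURCE B (Python) =====
-- _KEYWORD_TOPIC = {
--     'fertilizer': (0, 'fertilizer'), 'nutrient': (0, 'fertilizer'), 'soil': (0, 'fertilizer'),
--     'irrigation': (1, 'irrigation'), 'water': (1, 'irrigation'),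
--     'pest': (2, 'pest_control'), 'disease': (2, 'pest_control'), 'insect': (2, 'pest_control'),
--     'weather': (3, 'climate'), 'climate': (3, 'climate'), 'rain': (3, 'climate'),
--     'price': (4, 'market'), 'market': (4, 'market'), 'sell': (4, 'market'),
--     'scheme': (5, 'policy'), 'subsidy': (5, 'policy'), 'government': (5, 'policy'),
-- }
--
-- def _build_topic_filters(topic: str):
--     """Build filters based on agricultural topic.
--
--     Collects every keyword hit from a flat keyword->(priority, label) map,
--     then picks the highest-priority (smallest-rank) label of all hits."""
--     topic_lower = topic.lower()
--     hits = [pv for kw, pv in _KEYWORD_TOPIC.items() if kw in topic_lower]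
--     if not hits:
--         return {}
--     return {'topics': min(hits)[1]}
-- ===== Notes on version B (the rewrite author's own statement) =====
-- stated objective: alternative
-- what changed: Replaces the six if/elif branch groups by a flat keyword->(priority,label) map: one filter pass collects every keyword hit and min() picks the smallest-priority label, instead of an early-exit first-match branch chain.
import Mathlib
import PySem

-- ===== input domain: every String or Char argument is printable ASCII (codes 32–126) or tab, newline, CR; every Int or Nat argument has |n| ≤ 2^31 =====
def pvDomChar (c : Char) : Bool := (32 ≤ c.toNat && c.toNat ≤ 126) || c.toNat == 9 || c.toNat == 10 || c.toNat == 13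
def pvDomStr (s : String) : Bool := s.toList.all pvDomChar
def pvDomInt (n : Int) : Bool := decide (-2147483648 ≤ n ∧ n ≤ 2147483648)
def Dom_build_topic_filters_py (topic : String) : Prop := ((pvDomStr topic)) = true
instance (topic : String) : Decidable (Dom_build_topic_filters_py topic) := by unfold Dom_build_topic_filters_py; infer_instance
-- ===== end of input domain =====

-- B replaces A's six if/elif branch groups by a flat keyword -> (priority, label) map: one filter pass collects ALL keyword hits, then min picks the smallest-priority label (alternative decomposition, same cost). 


-- ===== PORT A =====
def build_topic_filters_py (topic : String) : List (String × String) :=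
  let topic_lower := PySem.Str.lower topic
  let filters : PySem.Dict String String := PySem.Dict.empty
  let filters :=
    if ["fertilizer", "nutrient", "soil"].any (fun w => PySem.Str.isIn w topic_lower) then
      filters.insert "topics" "fertilizer"
    else if ["irrigation", "water"].any (fun w => PySem.Str.isIn w topic_lower) then
      filters.insert "topics" "irrigation"
    else if ["pest", "disease", "insect"].any (fun w => PySem.Str.isIn w topic_lower) then
      filters.insert "topics" "pest_control"
    else if ["weather", "climate", "rain"].any (fun w => PySem.Str.isIn w topic_lower) then
      filters.insert "topics" "climate"
    else if ["price", "market", "sell"].any (fun w => PySem.Str.isIn w topic_lower) then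
      filters.insert "topics" "market"
    else if ["scheme", "subsidy", "government"].any (fun w => PySem.Str.isIn w topic_lower) then
      filters.insert "topics" "policy"
    else filters
  filters.items

-- ===== PORT B =====
-- Source B's module constant _KEYWORD_TOPIC: a flat keyword -> (priority, label) map, in insertion order
-- (the dict is only iterated with .items(), so the association list IS its items view)
def pvKeywordTopic : List (String × (Int × String)) :=
  [("fertilizer", (0, "fertilizer")), ("nutrient", (0, "fertilizer")), ("soil", (0, "fertilizer")),
   ("irrigation", (1, "irrigation")), ("water", (1, "irrigation")),
   ("pest", (2, "pest_control")), ("disease", (2, "pest_control")), ("insect", (2, "pest_control")),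
   ("weather", (3, "climate")), ("climate", (3, "climate")), ("rain", (3, "climate")),
   ("price", (4, "market")), ("market", (4, "market")), ("sell", (4, "market")),
   ("scheme", (5, "policy")), ("subsidy", (5, "policy")), ("government", (5, "policy"))]

-- hand port, exact: Python's '<' on str (code-point lexicographic; ASCII inputs here)
def pvCharsLt : List Char → List Char → Bool
  | [], [] => false
  | [], _ :: _ => true
  | _ :: _, [] => false
  | a :: as, b :: bs => if a.toNat < b.toNat then true else if b.toNat < a.toNat then false else pvCharsLt as bs

-- hand port, exact: Python's '<' on (int, str) tuples (lexicographic)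
def pvPairLt (a b : Int × String) : Bool :=
  a.1 < b.1 || (a.1 == b.1 && pvCharsLt a.2.toList b.2.toList)

-- hand port, exact: Python's min() on a nonempty list (left fold keeping the first minimum)
def pvMinPair (h : Int × String) (t : List (Int × String)) : Int × String :=
  t.foldl (fun m x => if pvPairLt x m then x else m) h

-- Source B's tail: 'if not hits: return {}' / 'return {'topics': min(hits)[1]}'
def pvPickMin : List (Int × String) → List (String × String)
  | [] => []
  | h :: t => [("topics", (pvMinPair h t).2)]

def build_topic_filters_py_alt (topic : String) : List (String × String) :=
  let topic_lower := PySem.Str.lower topic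
  let hits := (pvKeywordTopic.filter (fun e => PySem.Str.isIn e.1 topic_lower)).map Prod.snd
  pvPickMin hits

-- ===== PRECONDITION & SPEC =====
def Spec_build_topic_filters_py (topic : String) (out : List (String × String)) : Prop := out = build_topic_filters_py_alt topic
instance (topic : String) (out : List (String × String)) : Decidable (Spec_build_topic_filters_py topic out) := by unfold Spec_build_topic_filters_py; infer_instance

-- ===== CLAIM (what is proved, stated in full; the proofs are below) =====
def Claim_equal_build_topic_filters_py : Prop := ∀ (topic : String), Dom_build_topic_filters_py topic → Spec_build_topic_filters_py topic (build_topic_filters_py topic)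

-- ===== LEMMAS AND PROOFS =====

theorem pvCharsLt_irrefl (l : List Char) : pvCharsLt l l = false := by
  induction l with
  | nil => rfl
  | cons a as ih => simp [pvCharsLt, ih]

theorem pvPairLt_irrefl (a : Int × String) : pvPairLt a a = false := by
  simp [pvPairLt, pvCharsLt_irrefl]

theorem pvCharsLt_asym (l1 l2 : List Char) (h : pvCharsLt l1 l2 = true) : pvCharsLt l2 l1 = false := by
  induction l1 generalizing l2 with
  | nil => cases l2 <;> simp [pvCharsLt]
  | cons a as ih =>
    cases l2 with
    | nil => simp [pvCharsLt] at h
    | cons b bs =>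
      simp only [pvCharsLt] at h ⊢
      split_ifs at h ⊢ <;> first | rfl | omega | exact ih bs h

theorem pvPairLt_asym (a b : Int × String) (h : pvPairLt a b = true) : pvPairLt b a = false := by
  simp only [pvPairLt, Bool.or_eq_true, Bool.and_eq_true, beq_iff_eq, decide_eq_true_eq] at h ⊢
  rcases h with h | ⟨h1, h2⟩
  · have hb1 : ¬ b.1 < a.1 := by omega
    have hb2 : (b.1 == a.1) = false := by simp; omega
    simp [hb1, hb2]
  · have hb1 : ¬ b.1 < a.1 := by omega
    simp [h1, pvCharsLt_asym _ _ h2]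

-- min of a list whose minimum v also beats (or equals) every element is v
theorem pvMinPair_eq (v : Int × String) (t : List (Int × String)) (h : Int × String)
    (hh : h = v ∨ pvPairLt v h = true)
    (ht : ∀ x ∈ t, x = v ∨ pvPairLt v x = true)
    (hmem : h = v ∨ v ∈ t) : pvMinPair h t = v := by
  induction t generalizing h with
  | nil =>
    rcases hmem with rfl | hv
    · rfl
    · simp at hv
  | cons x t' ih =>
    have hx : x = v ∨ pvPairLt v x = true := ht x (by simp)
    have ht' : ∀ y ∈ t', y = v ∨ pvPairLt v y = true := fun y hy => ht y (by simp [hy])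
    show pvMinPair (if pvPairLt x h then x else h) t' = v
    rcases hh with rfl | hvh
    · -- h = v
      rcases hx with rfl | hvx
      · simp [pvPairLt_irrefl]
        exact ih _ (Or.inl rfl) ht' (Or.inl rfl)
      · simp [pvPairLt_asym _ _ hvx]
        exact ih _ (Or.inl rfl) ht' (Or.inl rfl)
    · -- pvPairLt v h
      rcases hx with rfl | hvx
      · simp [hvh]
        exact ih _ (Or.inl rfl) ht' (Or.inl rfl)
      · have hh' : (if pvPairLt x h then x else h) = v ∨ pvPairLt v (if pvPairLt x h then x else h) = true := by
          split_ifs <;> [exact Or.inr hvx; exact Or.inr hvh]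
        have hmem' : (if pvPairLt x h then x else h) = v ∨ v ∈ t' := by
          rcases hmem with rfl | hvt
          · exact absurd hvh (by simp [pvPairLt_irrefl])
          · rcases List.mem_cons.mp hvt with rfl | hvt'
            · exact absurd hvx (by simp [pvPairLt_irrefl])
            · exact Or.inr hvt'
        exact ih _ hh' ht' hmem'

theorem pvPickMin_eq (L : List (Int × String)) (v : Int × String) (hv : v ∈ L)
    (hall : ∀ x ∈ L, x = v ∨ pvPairLt v x = true) :
    pvPickMin L = [("topics", v.2)] := by
  cases L with
  | nil => simp at hv
  | cons h t =>
    have hm : pvMinPair h t = v := by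
      apply pvMinPair_eq v t h (hall h (by simp)) (fun x hx => hall x (by simp [hx]))
      rcases List.mem_cons.mp hv with rfl | hvt
      · exact Or.inl rfl
      · exact Or.inr hvt
    simp [pvPickMin, hm]

-- ===== VERDICT (by name: the statement is the Claim_ definition above) =====
theorem build_topic_filters_py_spec : Claim_equal_build_topic_filters_py := by
  intro topic _
  unfold Spec_build_topic_filters_py build_topic_filters_py build_topic_filters_py_alt
  dsimp only
  simp only [List.any_cons, List.any_nil, Bool.or_false]
  split_ifs with h1 h2 h3 h4 h5 h6
  · -- fertilizer
    rw [pvPickMin_eq _ ((0:Int), "fertilizer")]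
    · rfl
    · rcases (by simpa using h1 : _ ∨ _ ∨ _) with hb | hb | hb
      · exact List.mem_map.mpr ⟨("fertilizer", (0, "fertilizer")), List.mem_filter.mpr ⟨by simp [pvKeywordTopic], by simpa using hb⟩, rfl⟩
      · exact List.mem_map.mpr ⟨("nutrient", (0, "fertilizer")), List.mem_filter.mpr ⟨by simp [pvKeywordTopic], by simpa using hb⟩, rfl⟩
      · exact List.mem_map.mpr ⟨("soil", (0, "fertilizer")), List.mem_filter.mpr ⟨by simp [pvKeywordTopic], by simpa using hb⟩, rfl⟩
    · intro x hx
      obtain ⟨e, he, rfl⟩ := List.mem_map.mp hx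
      obtain ⟨hmem, hp⟩ := List.mem_filter.mp he
      fin_cases hmem <;> first | (left; rfl) | (right; decide)
  · -- irrigation
    rw [pvPickMin_eq _ ((1:Int), "irrigation")]
    · rfl
    · rcases (by simpa using h2 : _ ∨ _) with hb | hb
      · exact List.mem_map.mpr ⟨("irrigation", (1, "irrigation")), List.mem_filter.mpr ⟨by simp [pvKeywordTopic], by simpa using hb⟩, rfl⟩
      · exact List.mem_map.mpr ⟨("water", (1, "irrigation")), List.mem_filter.mpr ⟨by simp [pvKeywordTopic], by simpa using hb⟩, rfl⟩
    · intro x hx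
      obtain ⟨e, he, rfl⟩ := List.mem_map.mp hx
      obtain ⟨hmem, hp⟩ := List.mem_filter.mp he
      fin_cases hmem <;> first | (left; rfl) | (right; decide) | simp_all
  · -- pest_control
    rw [pvPickMin_eq _ ((2:Int), "pest_control")]
    · rfl
    · rcases (by simpa using h3 : _ ∨ _ ∨ _) with hb | hb | hb
      · exact List.mem_map.mpr ⟨("pest", (2, "pest_control")), List.mem_filter.mpr ⟨by simp [pvKeywordTopic], by simpa using hb⟩, rfl⟩
      · exact List.mem_map.mpr ⟨("disease", (2, "pest_control")), List.mem_filter.mpr ⟨by simp [pvKeywordTopic], by simpa using hb⟩, rfl⟩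
      · exact List.mem_map.mpr ⟨("insect", (2, "pest_control")), List.mem_filter.mpr ⟨by simp [pvKeywordTopic], by simpa using hb⟩, rfl⟩
    · intro x hx
      obtain ⟨e, he, rfl⟩ := List.mem_map.mp hx
      obtain ⟨hmem, hp⟩ := List.mem_filter.mp he
      fin_cases hmem <;> first | (left; rfl) | (right; decide) | simp_all
  · -- climate
    rw [pvPickMin_eq _ ((3:Int), "climate")]
    · rfl
    · rcases (by simpa using h4 : _ ∨ _ ∨ _) with hb | hb | hb
      · exact List.mem_map.mpr ⟨("weather", (3, "climate")), List.mem_filter.mpr ⟨by simp [pvKeywordTopic], by simpa using hb⟩, rfl⟩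
      · exact List.mem_map.mpr ⟨("climate", (3, "climate")), List.mem_filter.mpr ⟨by simp [pvKeywordTopic], by simpa using hb⟩, rfl⟩
      · exact List.mem_map.mpr ⟨("rain", (3, "climate")), List.mem_filter.mpr ⟨by simp [pvKeywordTopic], by simpa using hb⟩, rfl⟩
    · intro x hx
      obtain ⟨e, he, rfl⟩ := List.mem_map.mp hx
      obtain ⟨hmem, hp⟩ := List.mem_filter.mp he
      fin_cases hmem <;> first | (left; rfl) | (right; decide) | simp_all
  · -- market
    rw [pvPickMin_eq _ ((4:Int), "market")]
    · rfl
    · rcases (by simpa using h5 : _ ∨ _ ∨ _) with hb | hb | hb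
      · exact List.mem_map.mpr ⟨("price", (4, "market")), List.mem_filter.mpr ⟨by simp [pvKeywordTopic], by simpa using hb⟩, rfl⟩
      · exact List.mem_map.mpr ⟨("market", (4, "market")), List.mem_filter.mpr ⟨by simp [pvKeywordTopic], by simpa using hb⟩, rfl⟩
      · exact List.mem_map.mpr ⟨("sell", (4, "market")), List.mem_filter.mpr ⟨by simp [pvKeywordTopic], by simpa using hb⟩, rfl⟩
    · intro x hx
      obtain ⟨e, he, rfl⟩ := List.mem_map.mp hx
      obtain ⟨hmem, hp⟩ := List.mem_filter.mp he
      fin_cases hmem <;> first | (left; rfl) | (right; decide) | simp_all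
  · -- policy
    rw [pvPickMin_eq _ ((5:Int), "policy")]
    · rfl
    · rcases (by simpa using h6 : _ ∨ _ ∨ _) with hb | hb | hb
      · exact List.mem_map.mpr ⟨("scheme", (5, "policy")), List.mem_filter.mpr ⟨by simp [pvKeywordTopic], by simpa using hb⟩, rfl⟩
      · exact List.mem_map.mpr ⟨("subsidy", (5, "policy")), List.mem_filter.mpr ⟨by simp [pvKeywordTopic], by simpa using hb⟩, rfl⟩
      · exact List.mem_map.mpr ⟨("government", (5, "policy")), List.mem_filter.mpr ⟨by simp [pvKeywordTopic], by simpa using hb⟩, rfl⟩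
    · intro x hx
      obtain ⟨e, he, rfl⟩ := List.mem_map.mp hx
      obtain ⟨hmem, hp⟩ := List.mem_filter.mp he
      fin_cases hmem <;> first | (left; rfl) | simp_all
  · -- no keyword matches: both return []
    have hnil : pvKeywordTopic.filter (fun e => PySem.Str.isIn e.1 (PySem.Str.lower topic)) = [] := by
      rw [List.filter_eq_nil_iff]
      intro e hmem
      fin_cases hmem <;> simp_all
    rw [hnil]
    rfl
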